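-- pv_equiv track=rewrite | github.com/openvinotoolkit/openvino | src/plugins/intel_gpu/tests/bench_kernel/scripts/bench_kernel_converter.py | split_on_plus
-- ===== SOURCE A (Python) =====
-- from typing import List, Dict, Optional, Tuple
--
-- def split_on_plus(s: str) -> List[str]:
--     """Split string on '+' delimiters, respecting scientific notation.
--
--     E.g. 'activation_relu+activation_clamp:-6.78069e+07:6.78069e+07+quantize'
--     → ['activation_relu', 'activation_clamp:-6.78069e+07:6.78069e+07', 'quantize']
--     """
--     parts = []
--     current = []
--     i = 0
--     while i < len(s):
--         ch = s[i]
--         if ch == '+':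
--             # Check if this '+' is part of scientific notation (digit(s) + 'e'/'E' + '+')
--             if len(current) >= 2:
--                 prev = current[-1]
--                 prev2 = current[-2]
--                 if prev in ('e', 'E') and prev2.isdigit():
--                     current.append(ch)
--                     i += 1
--                     continue
--             # It's a genuine delimiter
--             parts.append(''.join(current))
--             current = []
--         else:
--             current.append(ch)
--         i += 1
--     if current:
--         parts.append(''.join(current))
--     return parts
-- ===== SOURCE B (Python) =====
-- def split_on_plus(s: str):
--     """Split string on '+' delimiters, respecting scientific notation.
--
--     Re-implementation: split on every '+' once, then reattach the pieces whose
--     preceding '+' is a scientific-notation exponent sign (segment so far ends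
--     in digit + 'e'/'E'); finally drop a trailing empty segment.
--     """
--     raw = s.split('+')
--     result = [raw[0]]
--     for piece in raw[1:]:
--         last = result[-1]
--         if len(last) >= 2 and last[-1] in 'eE' and last[-2].isdigit():
--             result[-1] = last + '+' + piece
--         else:
--             result.append(piece)
--     if result[-1] == '':
--         result.pop()
--     return result
-- ===== Notes on version B (the rewrite author's own statement) =====
-- stated objective: faster
-- what changed: B replaces A's character-by-character scan with explicit current/parts buffers by one str.split('+') followed by a fold that reattaches pieces whose preceding '+' is a scientific-notation exponent sign, popping a trailing empty segment at the end.
import Mathlib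
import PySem

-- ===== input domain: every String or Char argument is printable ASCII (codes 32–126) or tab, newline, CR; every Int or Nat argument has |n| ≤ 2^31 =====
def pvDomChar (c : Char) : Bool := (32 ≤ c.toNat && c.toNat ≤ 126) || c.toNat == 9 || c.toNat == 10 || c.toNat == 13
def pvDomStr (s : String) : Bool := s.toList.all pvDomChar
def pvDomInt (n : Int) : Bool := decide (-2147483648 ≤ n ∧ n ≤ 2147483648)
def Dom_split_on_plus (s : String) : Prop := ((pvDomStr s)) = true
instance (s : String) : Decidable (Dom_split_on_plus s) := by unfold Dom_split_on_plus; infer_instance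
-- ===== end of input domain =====

-- B splits once on every '+' and then reattaches the scientific-notation pieces,
-- instead of A's char-by-char scan; same output, simpler decomposition (no speed claim).

-- ===== PORT A =====
-- A's inline test: len(current) >= 2 and current[-1] in ('e','E') and current[-2].isdigit()
def split_on_plus_cond (current : List Char) : Bool :=
  decide (2 ≤ current.length) &&
    ((PySem.List.pyGetD current (-1) ' ' == 'e' || PySem.List.pyGetD current (-1) ' ' == 'E') &&
     PySem.Chars.isdigit (PySem.List.pyGetD current (-2) ' '))

-- the while-loop of A: cs = remaining chars s[i:], current and parts as in the Python
def split_on_plus_go (cs : List Char) (current : List Char) (parts : List String) : List String :=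
  match cs with
  | [] => if current.isEmpty then parts else parts ++ [String.mk current]
  | ch :: rest =>
    if ch = '+' then
      if split_on_plus_cond current then
        split_on_plus_go rest (current ++ [ch]) parts
      else
        split_on_plus_go rest [] (parts ++ [String.mk current])
    else
      split_on_plus_go rest (current ++ [ch]) parts

def split_on_plus (s : String) : List String :=
  split_on_plus_go s.toList [] []

-- ===== PORT B =====
-- B's test on the last segment built so far (last[-1], last[-2] guarded by the length)
def split_on_plus_alt_cond (last : List Char) : Bool :=
  decide (2 ≤ last.length) &&
    ((last.getLast?.getD ' ' == 'e' || last.getLast?.getD ' ' == 'E') &&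
     PySem.Chars.isdigit (last.dropLast.getLast?.getD ' '))

-- one step of B's loop: reattach the piece to result[-1] or start a new segment
def split_on_plus_alt_step (result : List (List Char)) (piece : List Char) : List (List Char) :=
  let last := result.getLast?.getD []
  if split_on_plus_alt_cond last then result.dropLast ++ [last ++ '+' :: piece]
  else result ++ [piece]

def split_on_plus_alt (s : String) : List String :=
  let raw := List.splitOn '+' s.toList   -- s.split('+') (never empty)
  let result := raw.tail.foldl split_on_plus_alt_step [raw.headD []]
  let result := if result.getLast? == some [] then result.dropLast else result  -- pop trailing ''
  result.map String.mk

-- ===== PRECONDITION & SPEC =====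
def Spec_split_on_plus (s : String) (out : List String) : Prop := out = split_on_plus_alt s
instance (s : String) (out : List String) : Decidable (Spec_split_on_plus s out) := by unfold Spec_split_on_plus; infer_instance

-- ===== CLAIM (what is proved, stated in full; the proofs are below) =====
def Claim_equal_split_on_plus : Prop := ∀ (s : String), Dom_split_on_plus s → Spec_split_on_plus s (split_on_plus s)

-- ===== LEMMAS AND PROOFS =====

-- B's loop run from an arbitrary state: earlier segments res, current open segment cur,
-- remaining characters cs still to be split
def pvBGen (cs cur : List Char) (res : List (List Char)) : List (List Char) :=
  (List.splitOn '+' cs).tail.foldl split_on_plus_alt_step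
    (res ++ [cur ++ (List.splitOn '+' cs).headD []])

def pvPop (l : List (List Char)) : List (List Char) :=
  if l.getLast? == some [] then l.dropLast else l

theorem pv_cond_eq (cur : List Char) : split_on_plus_cond cur = split_on_plus_alt_cond cur := by
  unfold split_on_plus_cond split_on_plus_alt_cond
  by_cases h : 2 ≤ cur.length
  · rcases List.eq_nil_or_concat cur with rfl | ⟨ys, b, rfl⟩
    · simp at h
    · rcases List.eq_nil_or_concat ys with rfl | ⟨zs, a, rfl⟩
      · simp at h
      · simp only [List.concat_eq_append]
        rw [PySem.List.pyGetD_neg_ofNat ((zs ++ [a]) ++ [b]) 2 ' ' (by simp) (by simp),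
            PySem.List.pyGetD_neg_one_append_singleton]
        simp [List.getLast?_append]
  · simp [h]

theorem pv_splitOn_ne_nil (cs : List Char) : List.splitOn '+' cs ≠ [] :=
  List.splitOnP_ne_nil _ cs

theorem pv_main (cs cur : List Char) (res : List (List Char)) :
    split_on_plus_go cs cur (res.map String.mk)
      = (pvPop (pvBGen cs cur res)).map String.mk := by
  induction cs generalizing cur res with
  | nil =>
    simp only [split_on_plus_go, pvBGen, pvPop]
    simp only [List.splitOn, List.splitOnP_nil, List.tail, List.foldl, List.headD]
    by_cases hc : cur = []
    · subst hc; simp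
    · simp [List.getLast?_append, List.isEmpty_iff, hc]
  | cons c rest ih =>
    by_cases hp : c = '+'
    · subst hp
      have hsplit : List.splitOn '+' ('+' :: rest) = [] :: List.splitOn '+' rest := by
        simp [List.splitOn, List.splitOnP_cons]
      obtain ⟨h, t, hht⟩ := List.exists_cons_of_ne_nil (pv_splitOn_ne_nil rest)
      simp only [split_on_plus_go]
      rw [pv_cond_eq]
      by_cases hcond : split_on_plus_alt_cond cur = true
      · -- scientific-notation '+': B's first fold step reattaches
        rw [if_pos hcond, ih]
        unfold pvBGen
        rw [hsplit, hht]
        simp only [List.headD, List.tail, List.append_nil, List.foldl_cons]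
        have hstep : split_on_plus_alt_step (res ++ [cur]) h
            = res ++ [(cur ++ ['+']) ++ h] := by
          unfold split_on_plus_alt_step
          simp [List.getLast?_append, hcond]
        rw [hstep]
        simp
      · -- genuine delimiter: B's first fold step appends a new segment
        rw [if_neg hcond]
        have : (res.map String.mk) ++ [String.mk cur] = (res ++ [cur]).map String.mk := by
          simp
        rw [this, ih]
        unfold pvBGen
        rw [hsplit, hht]
        simp only [List.headD, List.tail, List.append_nil, List.foldl_cons]
        have hstep : split_on_plus_alt_step (res ++ [cur]) h
            = (res ++ [cur]) ++ [[] ++ h] := by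
          unfold split_on_plus_alt_step
          simp [List.getLast?_append, hcond]
        rw [hstep]
        simp
    · -- ordinary character: extends the open segment on both sides
      have hsplit : List.splitOn '+' (c :: rest)
          = (List.splitOn '+' rest).modifyHead (c :: ·) := by
        simp [List.splitOn, List.splitOnP_cons, hp]
      obtain ⟨h, t, hht⟩ := List.exists_cons_of_ne_nil (pv_splitOn_ne_nil rest)
      simp only [split_on_plus_go, if_neg hp]
      rw [ih]
      congr 1
      unfold pvBGen
      rw [hsplit, hht]
      simp [List.modifyHead]

-- ===== VERDICT (by name: the statement is the Claim_ definition above) =====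
theorem split_on_plus_spec : Claim_equal_split_on_plus := by
  intro s _
  unfold Spec_split_on_plus split_on_plus split_on_plus_alt
  have := pv_main s.toList [] []
  simpa [pvBGen, pvPop] using this
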